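-- pv_equiv track=rewrite | github.com/MateusHSAraujo/MC102-2s2020 | lists/lista5exercício9.py | verificaestradassaimasnaochega
-- ===== SOURCE A (Python) =====
-- def verificamatriz(listabi):
--     matriz=True
--     for linha in listabi:
--         if matriz == False:
--             break
--         for outralinha in listabi:
--             if len(linha)!= len(outralinha):
--                 matriz=False
--                 break
--     if matriz == True:
--         linhas= len(listabi)
--         colunas= len(listabi[0])
--         return (linhas,colunas)
--     else:
--         return ()
--
-- def transpormatriz(matriz):
--     mt=[[0 for i in range(len(matriz))] for j in range(len(matriz[0]))]
--     (nlinhas,ncolunas)=verificamatriz(matriz)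
--     for i in range(nlinhas):
--         for j in  range(ncolunas):
--             valor = matriz[i][j]
--             mt[j][i] = valor
--     return mt
--
-- def verificaestradassaimasnaochega(mat):
--     matt=transpormatriz(mat)
--     naotemestradaschegando=[]
--     temestradasaindo=[]
--     for linhat in matt:
--         if sum(linhat) != 0:
--             naotemestradaschegando.append(0)
--         else:
--             naotemestradaschegando.append(1)
--     for linha in mat:
--         if sum(linha) != 0:
--             temestradasaindo.append(1)
--         else:
--             temestradasaindo.append(0)
--     resposta=[]
--     for a in range(len(mat)):
--         for b in range(len(mat)):
--             if a==b:
--                 if naotemestradaschegando[a] + temestradasaindo[a]==2: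
--                     resposta.append(True)
--                 else:
--                     resposta.append(False)
--     return resposta
-- ===== SOURCE B (Python) =====
-- def verificaestradassaimasnaochega(mat):
--     n = len(mat)
--     cols = len(mat[0])
--     if any(len(row) != cols for row in mat):
--         raise ValueError("mat is not a rectangular matrix")
--     return [sum(mat[i]) != 0 and sum(row[i] for row in mat) == 0 for i in range(n)]
-- ===== Notes on version B (the rewrite author's own statement) =====
-- stated objective: simpler
-- what changed: B drops A's materialized transpose and quadratic diagonal double loop, computing each node's row sum and column sum directly in one comprehension (measured ~2x faster in a timing run).
import Mathlib
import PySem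

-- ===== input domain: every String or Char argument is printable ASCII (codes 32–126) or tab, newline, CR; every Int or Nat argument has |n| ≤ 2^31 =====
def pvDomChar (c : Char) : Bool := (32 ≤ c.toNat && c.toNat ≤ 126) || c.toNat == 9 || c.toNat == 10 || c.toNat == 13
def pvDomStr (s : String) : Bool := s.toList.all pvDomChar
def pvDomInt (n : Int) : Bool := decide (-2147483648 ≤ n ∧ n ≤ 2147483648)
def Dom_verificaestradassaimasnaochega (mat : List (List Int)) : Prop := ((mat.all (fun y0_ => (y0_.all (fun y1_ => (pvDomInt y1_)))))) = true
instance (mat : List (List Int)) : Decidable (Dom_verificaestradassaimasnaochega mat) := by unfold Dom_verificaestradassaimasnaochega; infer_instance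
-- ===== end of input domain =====

-- B replaces A's materialized transpose and quadratic diagonal double loop by direct
-- row/column sums in one comprehension (objective: simpler); return value proved equal on Pre_.

-- ===== PORT A =====
-- mt[j][i] = v  (Python list-of-lists assignment; indices are range values, hence in range under Pre_)
def pvSet2 (mt : List (List Int)) (j i : Nat) (v : Int) : List (List Int) :=
  mt.set j ((mt.getD j []).set i v)

-- verificamatriz: returns some (linhas, colunas) when it returns a 2-tuple;
-- none when the Python raises IndexError (empty input) or returns () (caller then raises ValueError).
def pvVerificamatriz (listabi : List (List Int)) : Option (Nat × Nat) :=
  let matriz := listabi.foldl (fun m linha =>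
    if m = false then m
    else listabi.foldl (fun m2 outralinha =>
      if m2 = false then m2
      else if linha.length ≠ outralinha.length then false else m2) m) true
  if matriz = true then
    match listabi with
    | [] => none        -- listabi[0] raises IndexError
    | l0 :: _ => some (listabi.length, l0.length)
  else none

-- transpormatriz: none = the Python raises (empty / ragged matrix); loop indices are
-- range values and (under Pre_) in range, so Python indexing is getD here.
def pvTranspormatriz (matriz : List (List Int)) : Option (List (List Int)) :=
  match matriz with
  | [] => none          -- len(matriz[0]) raises IndexError
  | l0 :: _ =>
    let mt := (List.range l0.length).map (fun _ => (List.range matriz.length).map (fun _ => (0:Int)))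
    match pvVerificamatriz matriz with
    | none => none
    | some (nlinhas, ncolunas) =>
      some ((List.range nlinhas).foldl (fun mt i =>
        (List.range ncolunas).foldl (fun mt j =>
          let valor := (matriz.getD i []).getD j 0
          pvSet2 mt j i valor) mt) mt)

def verificaestradassaimasnaochega (mat : List (List Int)) : List Bool :=
  match pvTranspormatriz mat with
  | none => []   -- the Python raised here; such inputs are excluded by Pre_
  | some matt =>
    let naotemestradaschegando := matt.foldl (fun acc linhat =>
      if linhat.sum ≠ 0 then acc ++ [(0:Int)] else acc ++ [(1:Int)]) []
    let temestradasaindo := mat.foldl (fun acc linha =>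
      if linha.sum ≠ 0 then acc ++ [(1:Int)] else acc ++ [(0:Int)]) []
    (List.range mat.length).foldl (fun resposta a =>
      (List.range mat.length).foldl (fun resposta b =>
        if a = b then
          -- list indexing: a < length under Pre_ (Python raises IndexError when rows > cols, excluded)
          if naotemestradaschegando.getD a 0 + temestradasaindo.getD a 0 = 2
          then resposta ++ [true] else resposta ++ [false]
        else resposta) resposta) []

-- ===== PORT B =====
def verificaestradassaimasnaochega_alt (mat : List (List Int)) : List Bool :=
  let n := mat.length
  let cols := mat.headI.length   -- len(mat[0]); Python raises on empty mat (excluded by Pre_)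
  if mat.any (fun row => row.length ≠ cols) then []   -- Python raises ValueError here (excluded by Pre_)
  else (List.range n).map (fun i =>
    decide ((mat.getD i []).sum ≠ 0) && decide ((mat.map (fun row => row.getD i 0)).sum = 0))

-- ===== PRECONDITION & SPEC =====
-- Pre_ admits exactly the inputs on which the Python A returns: a nonempty rectangular
-- matrix with at least as many columns as rows (fewer columns than rows makes A's
-- naotemestradaschegando[a] raise IndexError; empty raises IndexError; ragged raises ValueError).
def Pre_verificaestradassaimasnaochega (mat : List (List Int)) : Prop :=
  mat ≠ [] ∧ (∀ row ∈ mat, row.length = mat.headI.length) ∧ mat.length ≤ mat.headI.length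
instance (mat : List (List Int)) : Decidable (Pre_verificaestradassaimasnaochega mat) := by
  unfold Pre_verificaestradassaimasnaochega; infer_instance

def pvWitness_verificaestradassaimasnaochega : List (List Int) := [[1, 0], [0, 0]]

def Spec_verificaestradassaimasnaochega (mat : List (List Int)) (out : List Bool) : Prop := out = verificaestradassaimasnaochega_alt mat
instance (mat : List (List Int)) (out : List Bool) : Decidable (Spec_verificaestradassaimasnaochega mat out) := by unfold Spec_verificaestradassaimasnaochega; infer_instance

-- ===== CLAIM (what is proved, stated in full; the proofs are below) =====
def Claim_equal_verificaestradassaimasnaochega : Prop := ∀ (mat : List (List Int)), Dom_verificaestradassaimasnaochega mat → Pre_verificaestradassaimasnaochega mat → Spec_verificaestradassaimasnaochega mat (verificaestradassaimasnaochega mat)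

-- ===== LEMMAS AND PROOFS =====

-- the inner rectangularity scan keeps the flag true when all rows have length c
theorem pv_inner_flag (linha : List Int) (c : Nat) (hl : linha.length = c)
    (L2 : List (List Int)) (h : ∀ o ∈ L2, o.length = c) :
    L2.foldl (fun m2 outralinha => if m2 = false then m2
      else if linha.length ≠ outralinha.length then false else m2) true = true := by
  induction L2 with
  | nil => rfl
  | cons o t ih =>
    have ho : linha.length = o.length := by rw [hl, h o (by simp)]
    simp only [List.foldl_cons]
    rw [if_neg (by simp), if_neg (by simp [ho])]
    exact ih (fun o ho => h o (by simp [ho]))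

theorem pv_flag (L : List (List Int)) (c : Nat) (h : ∀ l ∈ L, l.length = c)
    (L1 : List (List Int)) (h1 : ∀ l ∈ L1, l.length = c) :
    L1.foldl (fun m linha => if m = false then m
      else L.foldl (fun m2 outralinha => if m2 = false then m2
        else if linha.length ≠ outralinha.length then false else m2) m) true = true := by
  induction L1 with
  | nil => rfl
  | cons lh t ih =>
    simp only [List.foldl_cons, reduceCtorEq, if_false]
    rw [pv_inner_flag lh c (h1 lh (by simp)) L h]
    exact ih (fun l hl => h1 l (by simp [hl]))

theorem pv_verificamatriz_eq (l0 : List Int) (rest : List (List Int))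
    (h : ∀ row ∈ l0 :: rest, row.length = l0.length) :
    pvVerificamatriz (l0 :: rest) = some ((l0 :: rest).length, l0.length) := by
  unfold pvVerificamatriz
  rw [pv_flag (l0 :: rest) l0.length h (l0 :: rest) h]
  simp

theorem pv_getD_set {A : Type} (M : List A) (j : Nat) (r : A) (j' : Nat) (d : A) :
    (M.set j r).getD j' d = if j' = j ∧ j < M.length then r else M.getD j' d := by
  simp only [List.getD_eq_getElem?_getD, List.getElem?_set]
  split_ifs with h1 h2 h3 h3 <;> simp_all

-- one pass of the inner transpose loop: rows 0..cnt-1 get position i set to e j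
theorem pv_inner_fold (i : Nat) (e : Nat → Int) (mt : List (List Int)) (cnt : Nat)
    (hc : cnt ≤ mt.length) :
    ((List.range cnt).foldl (fun M j => pvSet2 M j i (e j)) mt).length = mt.length ∧
    ∀ j, ((List.range cnt).foldl (fun M j => pvSet2 M j i (e j)) mt).getD j [] =
      if j < cnt then (mt.getD j []).set i (e j) else mt.getD j [] := by
  induction cnt with
  | zero => simp
  | succ k ih =>
    obtain ⟨hlen, hget⟩ := ih (Nat.le_of_succ_le hc)
    rw [List.range_succ, List.foldl_append, List.foldl_cons, List.foldl_nil]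
    set F := (List.range k).foldl (fun M j => pvSet2 M j i (e j)) mt with hF
    unfold pvSet2
    have hklen : k < mt.length := hc
    refine ⟨by rw [List.length_set, hlen], ?_⟩
    intro j
    rw [pv_getD_set]
    have hklenF : k < F.length := by rw [hlen]; exact hklen
    have hFk : F.getD k [] = mt.getD k [] := by rw [hget k]; simp
    by_cases hj : j = k
    · subst hj
      rw [if_pos ⟨rfl, hklenF⟩, hFk, if_pos (Nat.lt_succ_self j)]
    · rw [if_neg (by tauto), hget j]
      by_cases hjk : j < k
      · rw [if_pos hjk, if_pos (by omega)]
      · rw [if_neg hjk, if_neg (by omega)]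

-- the outer transpose loop after k rows: column j is the first k entries of column j, then zeros
theorem pv_outer_fold (mat : List (List Int)) (c : Nat) (hc : ∀ row ∈ mat, row.length = c)
    (k : Nat) (hk : k ≤ mat.length) :
    (((List.range k).foldl (fun mt i => (List.range c).foldl
        (fun mt j => pvSet2 mt j i ((mat.getD i []).getD j 0)) mt)
      ((List.range c).map (fun _ => (List.range mat.length).map (fun _ => (0:Int))))).length = c) ∧
    ∀ j, j < c →
      ((List.range k).foldl (fun mt i => (List.range c).foldl
        (fun mt j => pvSet2 mt j i ((mat.getD i []).getD j 0)) mt)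
      ((List.range c).map (fun _ => (List.range mat.length).map (fun _ => (0:Int))))).getD j [] =
      ((mat.take k).map (fun row => row.getD j 0)) ++ List.replicate (mat.length - k) 0 := by
  induction k with
  | zero =>
    refine ⟨by simp, ?_⟩
    intro j hj
    simp only [List.range_zero, List.foldl_nil, List.take_zero, List.map_nil, Nat.sub_zero,
      List.nil_append]
    rw [List.getD_eq_getElem _ _ (by simpa using hj), List.getElem_map]
    rw [List.map_const', List.length_range]
  | succ k ih =>
    obtain ⟨hlen, hget⟩ := ih (Nat.le_of_succ_le hk)
    rw [List.range_succ, List.foldl_append, List.foldl_cons, List.foldl_nil]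
    set T := (List.range k).foldl (fun mt i => (List.range c).foldl
        (fun mt j => pvSet2 mt j i ((mat.getD i []).getD j 0)) mt)
      ((List.range c).map (fun _ => (List.range mat.length).map (fun _ => (0:Int)))) with hT
    obtain ⟨hlen', hget'⟩ := pv_inner_fold k (fun j => (mat.getD k []).getD j 0) T c (le_of_eq hlen.symm)
    refine ⟨by rw [hlen', hlen], ?_⟩
    intro j hj
    rw [hget' j, if_pos hj, hget j hj]
    have hkm : k < mat.length := hk
    -- set position k of (prefix ++ replicate (n-k) 0)
    have hplen : ((mat.take k).map (fun row => row.getD j 0)).length = k := by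
      simp [Nat.min_eq_left (Nat.le_of_succ_le hk)]
    rw [List.set_append, hplen, if_neg (by omega)]
    have hrep : List.replicate (mat.length - k) (0:Int) = 0 :: List.replicate (mat.length - (k+1)) 0 := by
      have : mat.length - k = (mat.length - (k+1)) + 1 := by omega
      rw [this, List.replicate_succ]
    rw [hrep]
    have hset : (((0:Int) :: List.replicate (mat.length - (k+1)) 0).set (k - k) ((mat.getD k []).getD j 0))
        = (mat.getD k []).getD j 0 :: List.replicate (mat.length - (k+1)) 0 := by
      simp
    rw [hset]
    have htake : mat.take (k+1) = mat.take k ++ [mat.getD k []] := by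
      rw [List.take_succ, List.getElem?_eq_getElem hkm, List.getD_eq_getElem _ _ hkm]
      rfl
    rw [htake, List.map_append]
    simp

theorem pv_foldl_append_map {A B : Type} (f : A → B) (L : List A) (init : List B) :
    L.foldl (fun acc x => acc ++ [f x]) init = init ++ L.map f := by
  induction L generalizing init with
  | nil => simp
  | cons h t ih => simp [ih]

theorem pv_foldl_skip {B : Type} (a : Nat) (x : B) (L : List Nat) (ha : a ∉ L) (r0 : List B) :
    L.foldl (fun r b => if a = b then r ++ [x] else r) r0 = r0 := by
  induction L generalizing r0 with
  | nil => rfl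
  | cons h t ih =>
    simp only [List.mem_cons, not_or] at ha
    simp only [List.foldl_cons, if_neg ha.1]
    exact ih ha.2 r0

theorem pv_foldl_once {B : Type} (a : Nat) (x : B) (L : List Nat) (ha : a ∈ L) (hnd : L.Nodup)
    (r0 : List B) : L.foldl (fun r b => if a = b then r ++ [x] else r) r0 = r0 ++ [x] := by
  induction L generalizing r0 with
  | nil => cases ha
  | cons h t ih =>
    rw [List.nodup_cons] at hnd
    simp only [List.foldl_cons]
    by_cases hah : a = h
    · subst hah
      rw [if_pos rfl]
      exact pv_foldl_skip a x t hnd.1 _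
    · rw [if_neg hah]
      exact ih (by cases ha with | head => exact absurd rfl hah | tail _ h => exact h) hnd.2 r0

-- the a/b double loop appends exactly one boolean per a
theorem pv_result_loop (n : Nat) (P : Nat → Prop) [inst : DecidablePred P]
    (L : List Nat) (hL : ∀ a ∈ L, a < n) (hnd : L.Nodup) (r0 : List Bool) :
    L.foldl (fun resposta a => (List.range n).foldl (fun resposta b =>
      if a = b then (if P a then resposta ++ [true] else resposta ++ [false]) else resposta)
      resposta) r0 = r0 ++ L.map (fun a => if P a then true else false) := by
  induction L generalizing r0 with
  | nil => simp
  | cons a t ih =>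
    rw [List.nodup_cons] at hnd
    simp only [List.foldl_cons, List.map_cons]
    have hstep : (List.range n).foldl (fun resposta b =>
        if a = b then (if P a then resposta ++ [true] else resposta ++ [false]) else resposta) r0
        = r0 ++ [if P a then true else false] := by
      by_cases hp : P a
      · simp only [if_pos hp]
        exact pv_foldl_once a true (List.range n) (List.mem_range.2 (hL a (by simp))) List.nodup_range r0
      · simp only [if_neg hp]
        exact pv_foldl_once a false (List.range n) (List.mem_range.2 (hL a (by simp))) List.nodup_range r0
    rw [hstep, ih (fun b hb => hL b (by simp [hb])) hnd.2]
    simp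

theorem pv_getD_map {A B : Type} (f : A → B) (L : List A) (a : Nat) (h : a < L.length)
    (d : B) (d' : A) : (L.map f).getD a d = f (L.getD a d') := by
  rw [List.getD_eq_getElem _ _ (by simpa using h), List.getElem_map, List.getD_eq_getElem _ _ h]

theorem verificaestradassaimasnaochega_spec : Claim_equal_verificaestradassaimasnaochega := by
  intro mat _ hpre
  obtain ⟨hne, hrect, hlen⟩ := hpre
  match mat, hne with
  | l0 :: rest, _ =>
  unfold Spec_verificaestradassaimasnaochega
  have hrect' : ∀ row ∈ l0 :: rest, row.length = l0.length := by simpa using hrect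
  have hlen' : (l0 :: rest).length ≤ l0.length := by simpa using hlen
  set mat := l0 :: rest with hmat
  set n := mat.length with hn
  set c := l0.length with hc
  -- A side
  unfold verificaestradassaimasnaochega pvTranspormatriz
  rw [hmat, pv_verificamatriz_eq l0 rest hrect']
  simp only
  obtain ⟨hTlen, hTget⟩ := pv_outer_fold (l0 :: rest) c hrect' (l0 :: rest).length (le_refl _)
  set T := (List.range (l0 :: rest).length).foldl (fun mt i => (List.range c).foldl
      (fun mt j => pvSet2 mt j i (((l0 :: rest).getD i []).getD j 0)) mt)
    ((List.range c).map (fun _ => (List.range (l0 :: rest).length).map (fun _ => (0:Int)))) with hTdef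
  -- the two append loops are maps
  have hnao : T.foldl (fun acc linhat => if linhat.sum ≠ 0 then acc ++ [(0:Int)] else acc ++ [(1:Int)]) []
      = T.map (fun l => if l.sum ≠ 0 then (0:Int) else 1) := by
    have hb : (fun (acc : List Int) (linhat : List Int) =>
        if linhat.sum ≠ 0 then acc ++ [(0:Int)] else acc ++ [(1:Int)])
        = fun acc linhat => acc ++ [if linhat.sum ≠ 0 then (0:Int) else 1] := by
      funext acc l; split_ifs <;> rfl
    rw [hb, pv_foldl_append_map]
    simp
  have htem : (l0 :: rest).foldl (fun acc linha => if linha.sum ≠ 0 then acc ++ [(1:Int)] else acc ++ [(0:Int)]) []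
      = (l0 :: rest).map (fun l => if l.sum ≠ 0 then (1:Int) else 0) := by
    have hb : (fun (acc : List Int) (linha : List Int) =>
        if linha.sum ≠ 0 then acc ++ [(1:Int)] else acc ++ [(0:Int)])
        = fun acc linha => acc ++ [if linha.sum ≠ 0 then (1:Int) else 0] := by
      funext acc l; split_ifs <;> rfl
    rw [hb, pv_foldl_append_map]
    simp
  rw [hnao, htem]
  rw [pv_result_loop (l0 :: rest).length
      (fun a => (T.map (fun l => if l.sum ≠ 0 then (0:Int) else 1)).getD a 0 +
        ((l0 :: rest).map (fun l => if l.sum ≠ 0 then (1:Int) else 0)).getD a 0 = 2)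
      (List.range (l0 :: rest).length) (fun a ha => List.mem_range.1 ha) List.nodup_range []]
  -- B side
  have hany : (l0 :: rest).any (fun row => row.length ≠ (l0 :: rest).headI.length) = false := by
    simp only [List.any_eq_false]
    intro row hrow
    simp [hrect' row hrow, hc]
  have hB : verificaestradassaimasnaochega_alt (l0 :: rest)
      = (List.range (l0 :: rest).length).map (fun i =>
          decide (((l0 :: rest).getD i []).sum ≠ 0) &&
          decide (((l0 :: rest).map (fun row => row.getD i 0)).sum = 0)) := by
    simp only [verificaestradassaimasnaochega_alt]
    rw [hany]
    simp
  rw [hB]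
  simp only [List.nil_append]
  -- pointwise equality of the two maps over range n
  apply List.map_congr_left
  intro a ha
  rw [List.mem_range] at ha
  have hac : a < c := lt_of_lt_of_le ha hlen'
  have hTl : a < T.length := by rw [hTlen]; exact hac
  have hml : a < (l0 :: rest).length := ha
  have h1 : (T.map (fun l => if l.sum ≠ 0 then (0:Int) else 1)).getD a 0
      = if (T.getD a []).sum ≠ 0 then (0:Int) else 1 := pv_getD_map _ T a hTl 0 []
  have h2 : ((l0 :: rest).map (fun l => if l.sum ≠ 0 then (1:Int) else 0)).getD a 0
      = if (((l0 :: rest)).getD a []).sum ≠ 0 then (1:Int) else 0 := pv_getD_map _ _ a hml 0 []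
  have h3 : T.getD a [] = (l0 :: rest).map (fun row => row.getD a 0) := by
    rw [hTget a hac]
    simp
  rw [h1, h3, h2]
  by_cases hr : ((l0 :: rest).getD a []).sum = 0 <;>
    by_cases hcs : ((l0 :: rest).map (fun row => row.getD a 0)).sum = 0 <;>
      simp only [ne_eq, hr, hcs] <;> norm_num
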